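-- pv_equiv track=rewrite | github.com/zhannaklimanova/nlp_city_facts | city_facts_classifier.py | count_ngram_frequency
-- ===== SOURCE A (Python) =====
-- def count_ngram_frequency(ngrams_list, frequency_threshold=1):
--     ngram_freq = dict()
--
--     for ngrams_sublist in ngrams_list:
--         for ngram in ngrams_sublist:
--             ngram_tuple = tuple(ngram)
--             ngram_freq[ngram_tuple] = ngram_freq.get(ngram_tuple, 0) + 1
--
--     sorted_ngrams = sorted(ngram_freq.items(), key=lambda item: item[1], reverse=True)
--     frequent_ngrams = [ngram for ngram in sorted_ngrams if ngram[1] > frequency_threshold]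
--     combined_frequent_ngrams = [" ".join(ngram) for ngram, _ in frequent_ngrams]
--
--     return frequent_ngrams, combined_frequent_ngrams
-- ===== SOURCE B (Python) =====
-- def count_ngram_frequency(ngrams_list, frequency_threshold=1):
--     ngram_freq = dict()
--     for ngrams_sublist in ngrams_list:
--         for ngram in ngrams_sublist:
--             ngram_tuple = tuple(ngram)
--             ngram_freq[ngram_tuple] = ngram_freq.get(ngram_tuple, 0) + 1
--
--     # bucket the counted ngrams by frequency instead of sorting
--     max_freq = 0
--     buckets = dict()
--     for ngram_tuple, freq in ngram_freq.items():
--         if freq > max_freq: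
--             max_freq = freq
--         buckets[freq] = buckets.get(freq, []) + [(ngram_tuple, freq)]
--
--     # walk the frequencies from the highest down to the threshold (exclusive)
--     frequent_ngrams = []
--     combined_frequent_ngrams = []
--     count = max_freq
--     while count > frequency_threshold and count > 0:
--         for item in buckets.get(count, []):
--             frequent_ngrams.append(item)
--             combined_frequent_ngrams.append(" ".join(item[0]))
--         count -= 1
--     return frequent_ngrams, combined_frequent_ngrams
-- ===== Notes on version B (the rewrite author's own statement) =====
-- stated objective: alternative
-- what changed: Replaces sorted(items, key=count, reverse=True) followed by a threshold filter with a bucket dict grouping ngrams by frequency plus a walk from the maximal frequency down to the threshold, building both result lists in one pass without any sort call.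
import Mathlib
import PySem

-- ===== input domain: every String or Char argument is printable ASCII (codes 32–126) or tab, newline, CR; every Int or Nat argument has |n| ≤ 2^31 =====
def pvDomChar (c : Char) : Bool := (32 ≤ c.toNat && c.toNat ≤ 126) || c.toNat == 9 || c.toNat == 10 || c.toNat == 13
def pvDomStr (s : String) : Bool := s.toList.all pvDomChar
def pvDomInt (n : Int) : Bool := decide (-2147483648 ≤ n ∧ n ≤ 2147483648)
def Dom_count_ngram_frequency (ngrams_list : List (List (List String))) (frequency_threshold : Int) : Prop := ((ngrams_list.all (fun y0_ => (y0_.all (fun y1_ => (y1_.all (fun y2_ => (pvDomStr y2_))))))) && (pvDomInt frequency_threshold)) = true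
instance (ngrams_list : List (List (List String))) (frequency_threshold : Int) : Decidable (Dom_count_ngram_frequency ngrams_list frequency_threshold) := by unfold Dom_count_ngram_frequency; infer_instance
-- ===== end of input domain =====

-- B replaces A's sort-then-filter with a frequency-bucket dict walked from the
-- highest count down to the threshold (objective: alternative, no sort call).

-- ===== PORT A =====
def count_ngram_frequency (ngrams_list : List (List (List String))) (frequency_threshold : Int) : (List (List String × Int)) × List String :=
  let ngram_freq : PySem.Dict (List String) Int :=
    ngrams_list.foldl (fun d ngrams_sublist =>
      ngrams_sublist.foldl (fun d ngram => d.insert ngram (d.getD ngram 0 + 1)) d)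
      PySem.Dict.empty
  let sorted_ngrams := PySem.List.sorted ngram_freq.items (fun item => item.2) true
  let frequent_ngrams := sorted_ngrams.filter (fun ngram => decide (frequency_threshold < ngram.2))
  let combined_frequent_ngrams := frequent_ngrams.map (fun p => PySem.Str.join " " p.1)
  (frequent_ngrams, combined_frequent_ngrams)

-- ===== PORT B =====
-- the 'while count > frequency_threshold and count > 0' loop of Source B
def pvBWalk (buckets : PySem.Dict Int (List (List String × Int))) (frequency_threshold : Int) (count : Int) (frequent : List (List String × Int)) (combined : List String) : (List (List String × Int)) × List String :=
  if h : frequency_threshold < count ∧ 0 < count then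
    let bucket := buckets.getD count []
    pvBWalk buckets frequency_threshold (count - 1) (frequent ++ bucket)
      (combined ++ bucket.map (fun item => PySem.Str.join " " item.1))
  else (frequent, combined)
termination_by count.toNat
decreasing_by omega

def count_ngram_frequency_alt (ngrams_list : List (List (List String))) (frequency_threshold : Int) : (List (List String × Int)) × List String :=
  let ngram_freq : PySem.Dict (List String) Int :=
    ngrams_list.foldl (fun d ngrams_sublist =>
      ngrams_sublist.foldl (fun d ngram => d.insert ngram (d.getD ngram 0 + 1)) d)
      PySem.Dict.empty
  let st := ngram_freq.items.foldl
    (fun (st : Int × PySem.Dict Int (List (List String × Int))) item =>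
      ((if st.1 < item.2 then item.2 else st.1),
       st.2.modify item.2 [] (fun b => b ++ [item])))
    (0, PySem.Dict.empty)
  pvBWalk st.2 frequency_threshold st.1 [] []

-- ===== PRECONDITION & SPEC =====
def Spec_count_ngram_frequency (ngrams_list : List (List (List String))) (frequency_threshold : Int) (out : (List (List String × Int)) × List String) : Prop := out = count_ngram_frequency_alt ngrams_list frequency_threshold
instance (ngrams_list : List (List (List String))) (frequency_threshold : Int) (out : (List (List String × Int)) × List String) : Decidable (Spec_count_ngram_frequency ngrams_list frequency_threshold out) := by unfold Spec_count_ngram_frequency; infer_instance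

-- ===== CLAIM (what is proved, stated in full; the proofs are below) =====
def Claim_equal_count_ngram_frequency : Prop := ∀ (ngrams_list : List (List (List String))) (frequency_threshold : Int), Dom_count_ngram_frequency ngrams_list frequency_threshold → Spec_count_ngram_frequency ngrams_list frequency_threshold (count_ngram_frequency ngrams_list frequency_threshold)

-- ===== LEMMAS AND PROOFS =====

-- stable descending insertion keeps the list key-descending
theorem pv_ins_pairwise (x : List String × Int) (acc : List (List String × Int))
    (h : acc.Pairwise (fun a b => b.2 ≤ a.2)) :
    (PySem.List.insertBy (fun a b => decide (b.2 < a.2)) x acc).Pairwise (fun a b => b.2 ≤ a.2) := by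
  induction acc with
  | nil => simp [PySem.List.insertBy]
  | cons y ys ih =>
    rw [List.pairwise_cons] at h
    simp only [PySem.List.insertBy]
    split
    · rename_i hlt
      simp only [decide_eq_true_eq] at hlt
      refine List.pairwise_cons.2 ⟨?_, List.pairwise_cons.2 h⟩
      intro b hb
      rcases List.mem_cons.1 hb with rfl | hb
      · omega
      · have := h.1 b hb; omega
    · rename_i hge
      simp only [decide_eq_true_eq] at hge
      refine List.pairwise_cons.2 ⟨?_, ih h.2⟩
      intro b hb
      rcases (PySem.List.mem_insertBy _ _ _ _).1 hb with rfl | hb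
      · omega
      · exact h.1 b hb

-- insertion appends x at the end of its own key class (stability)
theorem pv_ins_filter (c : Int) (x : List String × Int) (acc : List (List String × Int))
    (h : acc.Pairwise (fun a b => b.2 ≤ a.2)) :
    (PySem.List.insertBy (fun a b => decide (b.2 < a.2)) x acc).filter (fun p => p.2 == c)
      = acc.filter (fun p => p.2 == c) ++ (if x.2 == c then [x] else []) := by
  induction acc with
  | nil => by_cases hx : x.2 = c <;> simp [PySem.List.insertBy, List.filter, hx]
  | cons y ys ih =>
    rw [List.pairwise_cons] at h
    simp only [PySem.List.insertBy]
    split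
    · rename_i hlt
      simp only [decide_eq_true_eq] at hlt
      by_cases hx : x.2 = c
      · have hnil : (y :: ys).filter (fun p => p.2 == c) = [] := by
          rw [List.filter_eq_nil_iff]
          intro a ha
          rcases List.mem_cons.1 ha with rfl | ha
          · simp only [beq_iff_eq]; omega
          · have := h.1 a ha; simp only [beq_iff_eq]; omega
        rw [List.filter_cons_of_pos (by simp [hx]), hnil]
        simp [hx]
      · rw [List.filter_cons_of_neg (by simp [hx])]
        simp [hx]
    · rename_i hge
      rw [List.filter_cons, List.filter_cons, ih h.2]
      split <;> simp

-- the whole insertion-sort fold: key-descending, and each key class is in input order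
theorem pv_foldl_sort (xs : List (List String × Int)) :
    ∀ acc, acc.Pairwise (fun a b => b.2 ≤ a.2) →
    ((xs.foldl (fun a x => PySem.List.insertBy (fun a b => decide (b.2 < a.2)) x a) acc).Pairwise (fun a b => b.2 ≤ a.2)
      ∧ ∀ c : Int, (xs.foldl (fun a x => PySem.List.insertBy (fun a b => decide (b.2 < a.2)) x a) acc).filter (fun p => p.2 == c)
          = acc.filter (fun p => p.2 == c) ++ xs.filter (fun p => p.2 == c)) := by
  induction xs with
  | nil => intro acc h; exact ⟨h, fun c => by simp⟩
  | cons x xs ih =>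
    intro acc h
    simp only [List.foldl_cons]
    obtain ⟨h1, h2⟩ := ih _ (pv_ins_pairwise x acc h)
    refine ⟨h1, fun c => ?_⟩
    rw [h2 c, pv_ins_filter c x acc h, List.filter_cons]
    by_cases hx : x.2 = c <;> simp [hx]

theorem pv_sorted_rev_pairwise (its : List (List String × Int)) :
    (PySem.List.sorted its (fun p => p.2) true).Pairwise (fun a b => b.2 ≤ a.2) :=
  PySem.List.sorted_pairwise_rev its _

theorem pv_sorted_rev_filter (its : List (List String × Int)) (c : Int) :
    (PySem.List.sorted its (fun p => p.2) true).filter (fun p => p.2 == c)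
      = its.filter (fun p => p.2 == c) := by
  rw [PySem.List.sorted_rev_eq_foldl_insertBy]
  have := (pv_foldl_sort its [] (by simp)).2 c
  simpa using this

-- two key-descending lists with the same key classes are equal
theorem pv_desc_ext : ∀ (l1 l2 : List (List String × Int)),
    l1.Pairwise (fun a b => b.2 ≤ a.2) → l2.Pairwise (fun a b => b.2 ≤ a.2) →
    (∀ c : Int, l1.filter (fun p => p.2 == c) = l2.filter (fun p => p.2 == c)) → l1 = l2 := by
  intro l1
  induction l1 with
  | nil =>
    intro l2 _ _ hf
    cases l2 with
    | nil => rfl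
    | cons b t2 =>
      have := hf b.2
      simp [List.filter_cons] at this
  | cons a t1 ih =>
    intro l2 h1 h2 hf
    cases l2 with
    | nil =>
      have := hf a.2
      simp [List.filter_cons] at this
    | cons b t2 =>
      rw [List.pairwise_cons] at h1 h2
      -- the two heads have the same (maximal) key
      have hab : a.2 = b.2 := by
        have hmem : a ∈ (b :: t2).filter (fun p => p.2 == a.2) := by
          rw [← hf a.2]; simp
        have hmem' := List.mem_filter.1 hmem
        have hb2 : a.2 ≤ b.2 := by
          rcases List.mem_cons.1 hmem'.1 with rfl | hmem''
          · omega
          · have := h2.1 a hmem''; omega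
        have hmemb : b ∈ (a :: t1).filter (fun p => p.2 == b.2) := by
          rw [hf b.2]; simp
        have hmemb' := List.mem_filter.1 hmemb
        have ha2 : b.2 ≤ a.2 := by
          rcases List.mem_cons.1 hmemb'.1 with rfl | hmem''
          · omega
          · have := h1.1 b hmem''; omega
        omega
      have hkey : a :: t1.filter (fun p => p.2 == b.2) = b :: t2.filter (fun p => p.2 == b.2) := by
        have h := hf a.2
        simpa [List.filter_cons, hab] using h
      obtain ⟨hhead, htail⟩ := List.cons_eq_cons.mp hkey
      subst hhead
      congr 1
      apply ih t2 h1.2 h2.2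
      intro c
      by_cases hc : c = a.2
      · subst hc
        simpa [← hab] using htail
      · have h := hf c
        have hac : (a.2 == c) = false := by
          simp only [beq_eq_false_iff_ne]
          omega
        simpa [List.filter_cons, hac] using h

-- A's output: key classes of the sorted-then-filtered list
theorem pv_A_filter (its : List (List String × Int)) (thr c : Int) :
    ((PySem.List.sorted its (fun p => p.2) true).filter (fun p => decide (thr < p.2))).filter (fun p => p.2 == c)
      = if thr < c then its.filter (fun p => p.2 == c) else [] := by
  rw [List.filter_filter]
  have hfun : (fun (p : List String × Int) => (p.2 == c) && decide (thr < p.2))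
      = (fun p => (decide (thr < c)) && (p.2 == c)) := by
    funext p
    by_cases hp : p.2 = c
    · simp [hp]
    · have hb : (p.2 == c) = false := beq_eq_false_iff_ne.mpr hp
      simp [hb]
  rw [hfun]
  by_cases h : thr < c
  · simp only [h, decide_true, Bool.true_and]
    exact pv_sorted_rev_filter its c
  · simp [h]

-- splitting the pair-state fold of port B
theorem pv_state_split (l : List (List String × Int)) :
    ∀ (a : Int) (b : PySem.Dict Int (List (List String × Int))),
    l.foldl (fun st item => ((if st.1 < item.2 then item.2 else st.1), st.2.modify item.2 [] (fun bb => bb ++ [item]))) (a, b)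
      = (l.foldl (fun m item => if m < item.2 then item.2 else m) a,
         l.foldl (fun d item => d.modify item.2 [] (fun bb => bb ++ [item])) b) := by
  induction l with
  | nil => intro a b; rfl
  | cons x xs ih => intro a b; simp only [List.foldl_cons]; exact ih _ _

-- the running maximum bounds every count and is nonnegative
theorem pv_foldl_max (its : List (List String × Int)) :
    ∀ m0 : Int, m0 ≤ its.foldl (fun m p => if m < p.2 then p.2 else m) m0
      ∧ ∀ p ∈ its, p.2 ≤ its.foldl (fun m p => if m < p.2 then p.2 else m) m0 := by
  induction its with
  | nil => intro m0; simp
  | cons x xs ih =>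
    intro m0
    simp only [List.foldl_cons, List.mem_cons]
    by_cases hc : m0 < x.2
    · simp only [if_pos hc]
      obtain ⟨h1, h2⟩ := ih x.2
      refine ⟨by omega, ?_⟩
      rintro p (rfl | hp)
      · exact h1
      · exact h2 p hp
    · simp only [if_neg hc]
      obtain ⟨h1, h2⟩ := ih m0
      refine ⟨h1, ?_⟩
      rintro p (rfl | hp)
      · omega
      · exact h2 p hp

-- the bucket dict groups the items by count, in input order
theorem pv_bks_getD (its : List (List String × Int)) (c : Int) :
    (its.foldl (fun d p => d.modify p.2 [] (fun b => b ++ [p])) PySem.Dict.empty).getD c []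
      = its.filter (fun p => p.2 == c) := by
  have hmap : its.foldl (fun d p => d.modify p.2 [] (fun b => b ++ [p])) PySem.Dict.empty
      = (its.map (fun p => (p.2, p))).foldl (fun d q => d.modify q.1 [] (fun b => b ++ [q.2])) PySem.Dict.empty := by
    rw [List.foldl_map]
  rw [hmap, PySem.Dict.getD_foldl_modify_append, List.filter_map]
  simp [PySem.Dict.getD_empty, Function.comp_def, List.map_map]

-- B's while loop, expressed through the tail it still has to emit
def pvTail (bks : PySem.Dict Int (List (List String × Int))) (thr : Int) (c : Int) : List (List String × Int) :=
  if thr < c ∧ 0 < c then bks.getD c [] ++ pvTail bks thr (c - 1) else []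
termination_by c.toNat
decreasing_by omega

theorem pv_walk_eq (bks : PySem.Dict Int (List (List String × Int))) (thr : Int) :
    ∀ (c : Int) (fr : List (List String × Int)) (cb : List String),
    pvBWalk bks thr c fr cb = (fr ++ pvTail bks thr c, cb ++ (pvTail bks thr c).map (fun item => PySem.Str.join " " item.1)) := by
  intro c
  induction c using pvTail.induct thr with
  | case1 c h ih =>
    intro fr cb
    rw [pvBWalk, pvTail, dif_pos h, if_pos h, ih]
    simp
  | case2 c h =>
    intro fr cb
    rw [pvBWalk, pvTail, dif_neg h, if_neg h]
    simp

theorem pv_tail_mem (bks : PySem.Dict Int (List (List String × Int))) (thr : Int)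
    (its : List (List String × Int))
    (hg : ∀ c : Int, bks.getD c [] = its.filter (fun p => p.2 == c)) :
    ∀ (c : Int) p, p ∈ pvTail bks thr c → thr < p.2 ∧ 0 < p.2 ∧ p.2 ≤ c := by
  intro c
  induction c using pvTail.induct thr with
  | case1 c h ih =>
    intro p hp
    rw [pvTail, if_pos h, hg c] at hp
    rcases List.mem_append.1 hp with hp | hp
    · have := (List.mem_filter.1 hp).2
      simp only [beq_iff_eq] at this
      omega
    · have := ih p hp; omega
  | case2 c h =>
    intro p hp
    rw [pvTail, if_neg h] at hp
    simp at hp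

theorem pv_tail_pairwise (bks : PySem.Dict Int (List (List String × Int))) (thr : Int)
    (its : List (List String × Int))
    (hg : ∀ c : Int, bks.getD c [] = its.filter (fun p => p.2 == c)) :
    ∀ c : Int, (pvTail bks thr c).Pairwise (fun a b => b.2 ≤ a.2) := by
  intro c
  induction c using pvTail.induct thr with
  | case1 c h ih =>
    rw [pvTail, if_pos h]
    rw [List.pairwise_append]
    refine ⟨?_, ih, ?_⟩
    · rw [hg c]
      have : ∀ a ∈ its.filter (fun p => p.2 == c), ∀ b ∈ its.filter (fun p => p.2 == c), b.2 ≤ a.2 := by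
        intro a ha b hb
        have ha' := (List.mem_filter.1 ha).2
        have hb' := (List.mem_filter.1 hb).2
        simp only [beq_iff_eq] at ha' hb'
        omega
      exact List.pairwise_of_forall_mem_list this
    · intro a ha b hb
      rw [hg c] at ha
      have ha' := (List.mem_filter.1 ha).2
      simp only [beq_iff_eq] at ha'
      have := pv_tail_mem bks thr its hg (c - 1) b hb
      omega
  | case2 c h =>
    rw [pvTail, if_neg h]
    exact List.Pairwise.nil

theorem pv_tail_filter (bks : PySem.Dict Int (List (List String × Int))) (thr : Int)
    (its : List (List String × Int))
    (hg : ∀ c : Int, bks.getD c [] = its.filter (fun p => p.2 == c)) :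
    ∀ (c k : Int), (pvTail bks thr c).filter (fun p => p.2 == k)
      = if thr < k ∧ 0 < k ∧ k ≤ c then its.filter (fun p => p.2 == k) else [] := by
  intro c
  induction c using pvTail.induct thr with
  | case1 c h ih =>
    intro k
    rw [pvTail, if_pos h, List.filter_append, hg c, List.filter_filter, ih k]
    by_cases hk : k = c
    · subst hk
      have hfun : (fun (p : List String × Int) => (p.2 == k) && (p.2 == k)) = (fun p => p.2 == k) := by
        funext p; by_cases hp : p.2 = k <;> simp [hp]
      rw [hfun]
      have : ¬(thr < k ∧ 0 < k ∧ k ≤ k - 1) := by omega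
      rw [if_neg this, if_pos (by omega)]
      simp
    · have hfun : (fun (p : List String × Int) => (p.2 == k) && (p.2 == c)) = (fun _ => false) := by
        funext p; by_cases hp : p.2 = k <;> simp [hp, beq_iff_eq]; omega
      rw [hfun, List.filter_false, List.nil_append]
      by_cases hkk : thr < k ∧ 0 < k ∧ k ≤ c
      · rw [if_pos (by omega), if_pos hkk]
      · rw [if_neg (by omega), if_neg hkk]
  | case2 c h =>
    intro k
    rw [pvTail, if_neg h]
    have : ¬(thr < k ∧ 0 < k ∧ k ≤ c) := by omega
    rw [if_neg this]
    rfl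

-- core equality, abstracted over the counted items
theorem pv_main (its : List (List String × Int)) (thr mf : Int)
    (bks : PySem.Dict Int (List (List String × Int)))
    (hg : ∀ c : Int, bks.getD c [] = its.filter (fun p => p.2 == c))
    (h1 : ∀ p ∈ its, 1 ≤ p.2) (hmf : ∀ p ∈ its, p.2 ≤ mf) :
    (PySem.List.sorted its (fun p => p.2) true).filter (fun p => decide (thr < p.2))
      = pvTail bks thr mf := by
  apply pv_desc_ext
  · exact List.Pairwise.filter _ (pv_sorted_rev_pairwise its)
  · exact pv_tail_pairwise bks thr its hg mf
  · intro c
    rw [pv_A_filter its thr c, pv_tail_filter bks thr its hg mf c]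
    by_cases h : thr < c
    · by_cases h2 : 0 < c ∧ c ≤ mf
      · rw [if_pos h, if_pos ⟨h, h2.1, h2.2⟩]
      · rw [if_pos h, if_neg (by omega)]
        rw [List.filter_eq_nil_iff]
        intro p hp hpc
        simp only [beq_iff_eq] at hpc
        have := h1 p hp
        have := hmf p hp
        omega
    · rw [if_neg h, if_neg (by omega)]

-- facts about the counting dict: keys unique, every stored count is ≥ 1
theorem pv_count_dict (ngrams_list : List (List (List String))) :
    ∀ p ∈ (ngrams_list.foldl (fun d ngrams_sublist =>
        ngrams_sublist.foldl (fun d ngram => d.insert ngram (d.getD ngram 0 + 1)) d)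
        (PySem.Dict.empty : PySem.Dict (List String) Int)).items, 1 ≤ p.2 := by
  intro p hp
  have hflat : ngrams_list.foldl (fun d ngrams_sublist =>
        ngrams_sublist.foldl (fun d ngram => d.insert ngram (d.getD ngram 0 + 1)) d)
        (PySem.Dict.empty : PySem.Dict (List String) Int)
      = ngrams_list.flatten.foldl (fun d ngram => d.insert ngram (d.getD ngram 0 + 1))
        (PySem.Dict.empty : PySem.Dict (List String) Int) := by
    rw [List.foldl_flatten]
  rw [hflat] at hp
  have hnd : (ngrams_list.flatten.foldl (fun d ngram => d.insert ngram (d.getD ngram 0 + 1))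
      (PySem.Dict.empty : PySem.Dict (List String) Int)).keys.Nodup :=
    PySem.Dict.nodup_keys_foldl_insert _ (fun d x => d.getD x 0 + 1) _ (by simp)
  obtain ⟨k, v⟩ := p
  have hget := PySem.Dict.getD_of_mem_items _ hp hnd 0
  rw [PySem.Dict.getD_foldl_insert_add_one] at hget
  have hkmem := PySem.Dict.mem_keys_of_mem_items _ hp
  rw [PySem.Dict.keys_foldl_insert] at hkmem
  have hmem : k ∈ ngrams_list.flatten := by
    rcases (PySem.Set.mem_update _ _ _).1 hkmem with hk | hk
    · simp [PySem.Dict.empty] at hk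
    · exact hk
  have hcount : 0 < ngrams_list.flatten.count k := List.count_pos_iff.2 hmem
  have hv : ((ngrams_list.flatten.count k : Int)) = v := by simpa using hget
  show (1 : Int) ≤ v
  omega

-- ===== VERDICT (by name: the statement is the Claim_ definition above) =====
theorem count_ngram_frequency_spec : Claim_equal_count_ngram_frequency := by
  intro ngrams_list thr _
  unfold Spec_count_ngram_frequency count_ngram_frequency count_ngram_frequency_alt
  set d := ngrams_list.foldl (fun d ngrams_sublist =>
      ngrams_sublist.foldl (fun d ngram => d.insert ngram (d.getD ngram 0 + 1)) d)
      (PySem.Dict.empty : PySem.Dict (List String) Int) with hd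
  simp only [pv_state_split]
  rw [pv_walk_eq]
  have hg : ∀ c : Int, (d.items.foldl (fun dd (item : List String × Int) => dd.modify item.2 [] (fun bb => bb ++ [item])) PySem.Dict.empty).getD c []
      = d.items.filter (fun p => p.2 == c) := fun c => pv_bks_getD d.items c
  have h1 : ∀ p ∈ d.items, 1 ≤ p.2 := pv_count_dict ngrams_list
  have hmf : ∀ p ∈ d.items, p.2 ≤ d.items.foldl (fun m (p : List String × Int) => if m < p.2 then p.2 else m) 0 :=
    (pv_foldl_max d.items 0).2
  have hmain := pv_main d.items thr
    (d.items.foldl (fun m (p : List String × Int) => if m < p.2 then p.2 else m) 0) _ hg h1 hmf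
  rw [← hmain]
  simp
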